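-- pv_equiv track=rewrite | github.com/Ahaberling/MasterThesis | utilities_old/my_comparative_utils.py | alligned_SCM_descriptives
-- ===== SOURCE A (Python) =====
-- def alligned_SCM_descriptives(diffusionArray_Topics_lp_columns, diffusion_length_list):
--     diffu_count_per_topic = []
--     diffu_duration_per_topic = []
--
--     for topic in range(len(diffusionArray_Topics_lp_columns)):
--         diff_count = 0
--         diff_duration = []
--         for entry in diffusion_length_list:
--             if entry[1] == topic:
--                 diff_count = diff_count+1
--                 diff_duration.append(entry[2])
--
--         diffu_count_per_topic.append(diff_count)
--         diffu_duration_per_topic.append(diff_duration)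
--
--     return  diffu_count_per_topic, diffu_duration_per_topic
-- ===== SOURCE B (Python) =====
-- def alligned_SCM_descriptives(diffusionArray_Topics_lp_columns, diffusion_length_list):
--     n_topics = len(diffusionArray_Topics_lp_columns)
--     counts = [0] * n_topics
--     durations = [[] for _ in range(n_topics)]
--     if n_topics > 0:
--         for entry in diffusion_length_list:
--             t = entry[1]
--             if 0 <= t < n_topics:
--                 counts[t] += 1
--                 durations[t].append(entry[2])
--     return counts, durations
-- ===== Notes on version B (the rewrite author's own statement) =====
-- stated objective: faster
-- what changed: Replaces the per-topic rescans of the whole entry list (one scan per topic) by a single pass that buckets each entry directly into preallocated per-topic count/duration slots.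
import Mathlib
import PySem

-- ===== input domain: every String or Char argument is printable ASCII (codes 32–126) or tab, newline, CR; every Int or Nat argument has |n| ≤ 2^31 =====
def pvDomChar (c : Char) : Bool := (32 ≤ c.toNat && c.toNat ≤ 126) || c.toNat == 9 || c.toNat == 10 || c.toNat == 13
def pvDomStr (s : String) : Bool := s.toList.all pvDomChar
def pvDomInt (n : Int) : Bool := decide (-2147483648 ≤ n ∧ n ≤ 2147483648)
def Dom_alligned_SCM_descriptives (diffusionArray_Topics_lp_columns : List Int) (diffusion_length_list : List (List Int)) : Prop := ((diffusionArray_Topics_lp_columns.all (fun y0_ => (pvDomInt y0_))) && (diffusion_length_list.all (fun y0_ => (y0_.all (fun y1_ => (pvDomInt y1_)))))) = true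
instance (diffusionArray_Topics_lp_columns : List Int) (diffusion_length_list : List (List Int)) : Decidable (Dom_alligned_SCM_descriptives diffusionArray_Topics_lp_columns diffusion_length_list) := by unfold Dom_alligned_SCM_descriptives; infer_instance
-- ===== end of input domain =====

-- B replaces A's per-topic rescans of the entry list by a single bucketing pass (O(T+N) vs O(T*N)).

-- ===== PORT A =====
-- Literal port of A: outer loop over range(len(columns)), inner scan of all entries per topic.
-- pyGetD with default 0 is exact under Pre_: every index A dereferences is then in range.
def alligned_SCM_descriptives (diffusionArray_Topics_lp_columns : List Int) (diffusion_length_list : List (List Int)) : List Int × List (List Int) :=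
  (PySem.List.pyRange 0 (diffusionArray_Topics_lp_columns.length : Int) 1).foldl
    (fun (acc : List Int × List (List Int)) topic =>
      let inner := diffusion_length_list.foldl
        (fun (s : Int × List Int) entry =>
          if PySem.List.pyGetD entry 1 0 = topic then
            (s.1 + 1, s.2 ++ [PySem.List.pyGetD entry 2 0])
          else s)
        (0, [])
      (acc.1 ++ [inner.1], acc.2 ++ [inner.2]))
    ([], [])

-- ===== PORT B =====
-- Literal port of B: preallocated per-topic buckets, one pass over the entries.
def alligned_SCM_descriptives_alt (diffusionArray_Topics_lp_columns : List Int) (diffusion_length_list : List (List Int)) : List Int × List (List Int) :=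
  let n := diffusionArray_Topics_lp_columns.length
  let counts : List Int := List.replicate n 0
  let durations : List (List Int) := List.replicate n []
  if n = 0 then (counts, durations)
  else
    diffusion_length_list.foldl
      (fun (acc : List Int × List (List Int)) entry =>
        let t := PySem.List.pyGetD entry 1 0
        if 0 ≤ t ∧ t < (n : Int) then
          (acc.1.set t.toNat (acc.1.getD t.toNat 0 + 1),
           acc.2.set t.toNat (acc.2.getD t.toNat [] ++ [PySem.List.pyGetD entry 2 0]))
        else acc)
      (counts, durations)

-- ===== PRECONDITION & SPEC =====
-- Pre_ excludes exactly the inputs where Python A raises IndexError (Python B raises on the same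
-- inputs): with at least one topic, every entry needs length ≥ 2, and length ≥ 3 when its entry[1]
-- is an in-range topic index. (The total Lean ports happen to agree even outside Pre_.)
def Pre_alligned_SCM_descriptives (diffusionArray_Topics_lp_columns : List Int) (diffusion_length_list : List (List Int)) : Prop :=
  diffusionArray_Topics_lp_columns = [] ∨
    ∀ e ∈ diffusion_length_list, 2 ≤ e.length ∧
      (0 ≤ e.getD 1 0 ∧ e.getD 1 0 < (diffusionArray_Topics_lp_columns.length : Int) → 3 ≤ e.length)
instance (diffusionArray_Topics_lp_columns : List Int) (diffusion_length_list : List (List Int)) : Decidable (Pre_alligned_SCM_descriptives diffusionArray_Topics_lp_columns diffusion_length_list) := by unfold Pre_alligned_SCM_descriptives; infer_instance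
def pvWitness_alligned_SCM_descriptives : List Int × List (List Int) := ([5, 7], [[9, 0, 4], [9, 1, 6], [9, 0, 2], [9, 5]])

def Spec_alligned_SCM_descriptives (diffusionArray_Topics_lp_columns : List Int) (diffusion_length_list : List (List Int)) (out : List Int × List (List Int)) : Prop := out = alligned_SCM_descriptives_alt diffusionArray_Topics_lp_columns diffusion_length_list
instance (diffusionArray_Topics_lp_columns : List Int) (diffusion_length_list : List (List Int)) (out : List Int × List (List Int)) : Decidable (Spec_alligned_SCM_descriptives diffusionArray_Topics_lp_columns diffusion_length_list out) := by unfold Spec_alligned_SCM_descriptives; infer_instance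

-- ===== CLAIM (what is proved, stated in full; the proofs are below) =====
def Claim_equal_alligned_SCM_descriptives : Prop := ∀ (diffusionArray_Topics_lp_columns : List Int) (diffusion_length_list : List (List Int)), Dom_alligned_SCM_descriptives diffusionArray_Topics_lp_columns diffusion_length_list → Pre_alligned_SCM_descriptives diffusionArray_Topics_lp_columns diffusion_length_list → Spec_alligned_SCM_descriptives diffusionArray_Topics_lp_columns diffusion_length_list (alligned_SCM_descriptives diffusionArray_Topics_lp_columns diffusion_length_list)

-- ===== LEMMAS AND PROOFS =====

-- per-topic count of entries with entry[1] == t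
def pvCnt (dll : List (List Int)) (t : Int) : Int :=
  (dll.countP (fun e => PySem.List.pyGetD e 1 0 == t) : Int)
-- per-topic list of the entry[2] values over entries with entry[1] == t
def pvDur (dll : List (List Int)) (t : Int) : List Int :=
  (dll.filter (fun e => PySem.List.pyGetD e 1 0 == t)).map (fun e => PySem.List.pyGetD e 2 0)

theorem pvCnt_cons (e : List Int) (l : List (List Int)) (t : Int) :
    pvCnt (e :: l) t = pvCnt l t + (if PySem.List.pyGetD e 1 0 = t then 1 else 0) := by
  by_cases h : PySem.List.pyGetD e 1 0 = t <;>
    simp [pvCnt, h]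

theorem pvDur_cons (e : List Int) (l : List (List Int)) (t : Int) :
    pvDur (e :: l) t =
      (if PySem.List.pyGetD e 1 0 = t then [PySem.List.pyGetD e 2 0] else []) ++ pvDur l t := by
  by_cases h : PySem.List.pyGetD e 1 0 = t <;>
    simp [pvDur, h]

-- A's inner scan computes (count, durations) for one topic
theorem pvInner (dll : List (List Int)) (t : Int) (s : Int × List Int) :
    dll.foldl
      (fun (s : Int × List Int) entry =>
        if PySem.List.pyGetD entry 1 0 = t then
          (s.1 + 1, s.2 ++ [PySem.List.pyGetD entry 2 0])
        else s) s
    = (s.1 + pvCnt dll t, s.2 ++ pvDur dll t) := by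
  induction dll generalizing s with
  | nil => simp [pvCnt, pvDur]
  | cons e l ih =>
    simp only [List.foldl_cons]
    by_cases h : PySem.List.pyGetD e 1 0 = t
    · simp [h, ih, pvCnt_cons, pvDur_cons]
      ring
    · simp [h, ih, pvCnt_cons, pvDur_cons]

-- A's outer loop appends one (count, duration-list) per topic
theorem pvPairs {α β γ : Type} (L : List γ) (f : γ → α) (g : γ → β) (xs : List α) (ys : List β) :
    L.foldl (fun (acc : List α × List β) t => (acc.1 ++ [f t], acc.2 ++ [g t])) (xs, ys)
      = (xs ++ L.map f, ys ++ L.map g) := by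
  induction L generalizing xs ys with
  | nil => simp
  | cons a l ih => simp [ih]

theorem pvA_shape (cols : List Int) (dll : List (List Int)) :
    alligned_SCM_descriptives cols dll
      = ((List.range cols.length).map (fun (i : Nat) => pvCnt dll (i : Int)),
         (List.range cols.length).map (fun (i : Nat) => pvDur dll (i : Int))) := by
  unfold alligned_SCM_descriptives
  have hfun : (fun (acc : List Int × List (List Int)) topic =>
      let inner := dll.foldl
        (fun (s : Int × List Int) entry =>
          if PySem.List.pyGetD entry 1 0 = topic then
            (s.1 + 1, s.2 ++ [PySem.List.pyGetD entry 2 0])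
          else s)
        (0, [])
      (acc.1 ++ [inner.1], acc.2 ++ [inner.2]))
      = (fun (acc : List Int × List (List Int)) topic =>
          (acc.1 ++ [pvCnt dll topic], acc.2 ++ [pvDur dll topic])) := by
    funext acc topic
    simp [pvInner]
  rw [hfun, pvPairs, PySem.List.pyRange_zero_nat, List.map_map]
  simp [Function.comp_def]

theorem pvGetD_set {α : Type} (xs : List α) (j i : Nat) (x d : α) (hi : i < xs.length) :
    (xs.set j x).getD i d = if i = j then x else xs.getD i d := by
  rw [List.getD_eq_getElem _ _ (by simpa using hi), List.getD_eq_getElem _ _ hi,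
    List.getElem_set]
  by_cases h : i = j
  · simp [h]
  · simp only [if_neg h, if_neg (fun hh : j = i => h hh.symm)]

-- reading every slot back reconstructs the list
theorem pvGetD_range {α : Type} (xs : List α) (d : α) :
    (List.range xs.length).map (fun i => xs.getD i d) = xs := by
  apply List.ext_getElem
  · simp
  · intro i h1 h2
    simp [List.getD_eq_getElem?_getD, h2]

-- B's single pass maintains, slot by slot, the per-topic count and duration list
theorem pvB_invariant (n : Nat) (dll : List (List Int)) (cs : List Int) (ds : List (List Int))
    (hcs : cs.length = n) (hds : ds.length = n) :
    dll.foldl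
      (fun (acc : List Int × List (List Int)) entry =>
        let t := PySem.List.pyGetD entry 1 0
        if 0 ≤ t ∧ t < (n : Int) then
          (acc.1.set t.toNat (acc.1.getD t.toNat 0 + 1),
           acc.2.set t.toNat (acc.2.getD t.toNat [] ++ [PySem.List.pyGetD entry 2 0]))
        else acc) (cs, ds)
    = ((List.range n).map (fun i => cs.getD i 0 + pvCnt dll (i : Int)),
       (List.range n).map (fun i => ds.getD i [] ++ pvDur dll (i : Int))) := by
  induction dll generalizing cs ds with
  | nil =>
    simp only [List.foldl_nil, pvCnt, pvDur, List.countP_nil, List.filter_nil, List.map_nil]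
    subst hcs
    refine Prod.ext ?_ ?_ <;> simp only []
    · calc cs = (List.range cs.length).map (fun i => cs.getD i 0) := (pvGetD_range cs 0).symm
        _ = (List.range cs.length).map (fun i => cs.getD i 0 + ((0 : Nat) : Int)) := by simp
    · calc ds = (List.range ds.length).map (fun i => ds.getD i []) := (pvGetD_range ds []).symm
        _ = (List.range cs.length).map (fun i => ds.getD i [] ++ []) := by rw [hds]; simp
  | cons e l ih =>
    simp only [List.foldl_cons]
    by_cases h : 0 ≤ PySem.List.pyGetD e 1 0 ∧ PySem.List.pyGetD e 1 0 < (n : Int)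
    · simp only [h, and_self, if_true]
      rw [ih _ _ (by simp [hcs]) (by simp [hds])]
      refine Prod.ext ?_ ?_ <;> simp only [] <;>
      · apply List.map_congr_left
        intro i hi
        rw [List.mem_range] at hi
        rw [pvGetD_set _ _ _ _ _ (by omega)]
        simp only [pvCnt_cons, pvDur_cons]
        have hiff : (i = (PySem.List.pyGetD e 1 0).toNat) ↔ (PySem.List.pyGetD e 1 0 = (i : Int)) := by
          omega
        by_cases hij : PySem.List.pyGetD e 1 0 = (i : Int)
        · simp only [hiff.mpr hij]
          rw [if_pos (show PySem.List.pyGetD e 1 0 = (((PySem.List.pyGetD e 1 0).toNat : Nat) : Int) by omega)]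
          try simp only [if_true]
          first
          | ring1
          | exact List.append_assoc _ _ _
        · simp only [if_neg (fun hh => hij (hiff.mp hh)), if_neg hij]
          first
          | ring1
          | simp
    · simp only [h, if_false]
      rw [ih _ _ hcs hds]
      refine Prod.ext ?_ ?_ <;> simp only [] <;>
      · apply List.map_congr_left
        intro i hi
        rw [List.mem_range] at hi
        simp only [pvCnt_cons, pvDur_cons]
        have hij : ¬ PySem.List.pyGetD e 1 0 = (i : Int) := by omega
        simp [hij]

theorem pvB_shape (cols : List Int) (dll : List (List Int)) :
    alligned_SCM_descriptives_alt cols dll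
      = ((List.range cols.length).map (fun (i : Nat) => pvCnt dll (i : Int)),
         (List.range cols.length).map (fun (i : Nat) => pvDur dll (i : Int))) := by
  unfold alligned_SCM_descriptives_alt
  by_cases hn : cols.length = 0
  · simp [hn]
  · simp only [hn, if_false]
    rw [pvB_invariant cols.length dll _ _ (by simp) (by simp)]
    refine Prod.ext ?_ ?_ <;> simp only [] <;>
    · apply List.map_congr_left
      intro i hi
      rw [List.mem_range] at hi
      simp [List.getD_eq_getElem?_getD, hi]

-- ===== VERDICT (by name: the statement is the Claim_ definition above) =====
theorem alligned_SCM_descriptives_spec : Claim_equal_alligned_SCM_descriptives := by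
  intro cols dll _ _
  unfold Spec_alligned_SCM_descriptives
  rw [pvA_shape, pvB_shape]
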